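-- pv_equiv track=rewrite | github.com/orez-/python-sundry | gray.py | powerset_delta
-- ===== SOURCE A (Python) =====
-- def powerset_delta(collection):
--     # https://en.wikipedia.org/wiki/Gray_code
--     lookup = {
--         key: value
--         for i, elem in enumerate(collection)
--         for key, value in [
--             (1 << i, (frozenset([elem]), frozenset())),
--             (-1 << i, (frozenset(), frozenset([elem]))),
--         ]
--     }
--     n = len(lookup) // 2
--     last_gray = 0
--     for i in range(1, 1 << n):
--         gray = i ^ (i >> 1)
--         yield lookup[gray - last_gray]
--         last_gray = gray
-- ===== SOURCE B (Python) =====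
-- def powerset_delta(collection):
--     # Reflected ("mirror-doubling") construction of the Gray-code delta sequence:
--     # for each new element e, the sequence becomes  old ++ [add e] ++ reversed(old with add/remove swapped).
--     deltas = []
--     for elem in collection:
--         deltas = deltas + [(frozenset([elem]), frozenset())] \
--                  + [(rem, add) for add, rem in reversed(deltas)]
--     yield from deltas
-- ===== Notes on version B (the rewrite author's own statement) =====
-- stated objective: alternative
-- what changed: B builds the delta sequence by the reflected (mirror-doubling) construction of the Gray code - for each new element the sequence becomes old ++ [add e] ++ reversed(old with add/remove swapped) - and never computes Gray-code indices, XORs or a delta lookup dict at all.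
import Mathlib
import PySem

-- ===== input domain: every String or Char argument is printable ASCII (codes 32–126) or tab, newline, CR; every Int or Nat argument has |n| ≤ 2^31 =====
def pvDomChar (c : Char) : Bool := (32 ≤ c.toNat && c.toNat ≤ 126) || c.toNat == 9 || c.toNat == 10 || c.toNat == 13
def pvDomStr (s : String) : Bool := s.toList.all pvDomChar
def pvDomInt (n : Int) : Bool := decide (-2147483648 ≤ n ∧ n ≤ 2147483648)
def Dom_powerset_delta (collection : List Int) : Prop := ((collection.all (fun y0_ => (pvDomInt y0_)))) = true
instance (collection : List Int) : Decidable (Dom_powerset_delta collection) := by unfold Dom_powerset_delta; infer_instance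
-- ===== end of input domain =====

-- B replaces A's Gray-code-index arithmetic and signed-delta lookup dict with the reflected
-- (mirror-doubling) construction: per element e the delta list becomes old ++ [add e] ++
-- reversed(swapped old); objective: alternative. Both Pythons are generators; the equivalence
-- is about the fully materialised output list.

-- ===== PORT A =====
-- the dict comprehension's (key, value) pairs in generation order
def pvPairsA (collection : List Int) : List (Int × (List Int × List Int)) :=
  (PySem.List.enumerate collection).flatMap (fun ie =>
    [((1 : Int) <<< ie.1, ([ie.2], ([] : List Int))),   -- 1 << i
     ((-1 : Int) <<< ie.1, (([] : List Int), [ie.2]))]) -- -1 << i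

-- loop body: gray = i ^ (i >> 1); yield lookup[gray - last_gray]
-- (the key gray - last_gray is always present in the dict — proved below — so KeyError is unreachable;
--  getD's default is never returned)
def pvStepA (lookup : PySem.Dict Int (List Int × List Int))
    (st : Int × List (List Int × List Int)) (i : Int) : Int × List (List Int × List Int) :=
  let gray := PySem.Int.bxor i (i >>> (1 : Nat))
  (gray, st.2 ++ [lookup.getD (gray - st.1) ([], [])])

def powerset_delta (collection : List Int) : List (List Int × List Int) :=
  let lookup := (pvPairsA collection).foldl (fun d kv => d.insert kv.1 kv.2) PySem.Dict.empty
  let n : Nat := lookup.size / 2          -- len(lookup) // 2 : both operands nonnegative, Nat division is exact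
  ((PySem.List.pyRange 1 ((1 : Int) <<< n) 1).foldl (pvStepA lookup) (0, [])).2

-- ===== PORT B =====
-- deltas = deltas + [(frozenset([elem]), frozenset())] + [(rem, add) for add, rem in reversed(deltas)]
def powerset_delta_alt (collection : List Int) : List (List Int × List Int) :=
  collection.foldl
    (fun deltas elem =>
      deltas ++ [([elem], ([] : List Int))] ++ deltas.reverse.map (fun p => (p.2, p.1)))
    []

-- ===== PRECONDITION & SPEC =====
def Spec_powerset_delta (collection : List Int) (out : List (List Int × List Int)) : Prop := out = powerset_delta_alt collection
instance (collection : List Int) (out : List (List Int × List Int)) : Decidable (Spec_powerset_delta collection out) := by unfold Spec_powerset_delta; infer_instance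

-- ===== CLAIM (what is proved, stated in full; the proofs are below) =====
def Claim_equal_powerset_delta : Prop := ∀ (collection : List Int), Dom_powerset_delta collection → Spec_powerset_delta collection (powerset_delta collection)

-- ===== LEMMAS AND PROOFS =====

-- the common characterisation both ports are reduced to: the i-th yielded pair, decoded arithmetically
def pvBodyB (elems : List Int) (i : Int) : List Int × List Int :=
  let p : Int := (PySem.Int.bitLength (PySem.Int.band i (-i)) : Int) - 1
  let e := PySem.List.pyGetD elems p 0
  if PySem.Int.band ((PySem.Int.bxor i (i >>> (1 : Nat))) >>> p.toNat) 1 = 1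
  then ([e], ([] : List Int))
  else (([] : List Int), [e])

-- ---- shift notation as powers ----
theorem pvShl1 (j : Nat) : (1 : Int) <<< j = 2 ^ j := by simp [Int.shiftLeft_eq]

theorem pvShl1I (j : Nat) : (1 : Int) <<< (j : Int) = 2 ^ j := by
  rw [Int.shiftLeft_eq_mul_pow]; push_cast; ring

theorem pvShlNeg1I (j : Nat) : (-1 : Int) <<< (j : Int) = -(2 ^ j) := by
  rw [Int.shiftLeft_eq_mul_pow]; push_cast; ring

-- ---- Nat bit plumbing ----
theorem pvXorHalf (a b ra rb : Nat) (ha : ra < 2) (hb : rb < 2) :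
    (2*a+ra) ^^^ (2*b+rb) = 2*(a ^^^ b) + (ra ^^^ rb) := by
  apply Nat.eq_of_testBit_eq; intro j
  cases j with
  | zero =>
    interval_cases ra <;> interval_cases rb <;>
      simp [Nat.testBit_zero, Nat.mul_add_mod, Nat.mul_mod_right] <;> omega
  | succ j =>
    have h1 : (2*a+ra)/2 = a := by omega
    have h2 : (2*b+rb)/2 = b := by omega
    have h3 : (2*(a ^^^ b)+(ra ^^^ rb))/2 = a ^^^ b := by
      have : ra ^^^ rb < 2 := by interval_cases ra <;> interval_cases rb <;> decide
      omega
    simp only [Nat.testBit_xor]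
    simp [Nat.testBit_succ, h1, h2, h3, Nat.testBit_xor]

theorem pvLandHalf (a b ra rb : Nat) (ha : ra < 2) (hb : rb < 2) :
    (2*a+ra) &&& (2*b+rb) = 2*(a &&& b) + (ra &&& rb) := by
  apply Nat.eq_of_testBit_eq; intro j
  cases j with
  | zero =>
    interval_cases ra <;> interval_cases rb <;>
      simp [Nat.testBit_zero, Nat.mul_add_mod, Nat.mul_mod_right]
  | succ j =>
    have h1 : (2*a+ra)/2 = a := by omega
    have h2 : (2*b+rb)/2 = b := by omega
    have h3 : (2*(a &&& b)+(ra &&& rb))/2 = a &&& b := by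
      have : ra &&& rb < 2 := by interval_cases ra <;> interval_cases rb <;> decide
      omega
    simp only [Nat.testBit_and]
    simp [Nat.testBit_succ, h1, h2, h3, Nat.testBit_and]

theorem pvXorSwap (a b c d : Nat) : (a ^^^ b) ^^^ (c ^^^ d) = (a ^^^ c) ^^^ (b ^^^ d) := by
  apply Nat.eq_of_testBit_eq; intro j
  simp only [Nat.testBit_xor]
  cases a.testBit j <;> cases b.testBit j <;> cases c.testBit j <;> cases d.testBit j <;> rfl

theorem pvXorDiv2 (a b : Nat) : a/2 ^^^ b/2 = (a ^^^ b)/2 := by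
  apply Nat.eq_of_testBit_eq; intro j
  simp [Nat.testBit_div_two, Nat.testBit_xor]

theorem pvMersenneXor (p : Nat) : (2^(p+1) - 1) ^^^ (2^p - 1) = 2^p := by
  induction p with
  | zero => decide
  | succ p ih =>
    have e1 : 2^(p+1+1) - 1 = 2*(2^(p+1) - 1) + 1 := by
      have h := Nat.one_le_two_pow (n := p+1)
      have h2 : (2:Nat)^(p+1+1) = 2*2^(p+1) := by ring
      omega
    have e2 : 2^(p+1) - 1 = 2*(2^p - 1) + 1 := by
      have h := Nat.one_le_two_pow (n := p)
      have h2 : (2:Nat)^(p+1) = 2*2^p := by ring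
      omega
    calc (2^(p+1+1) - 1) ^^^ (2^(p+1) - 1)
        = (2*(2^(p+1) - 1) + 1) ^^^ (2*(2^p - 1) + 1) := by rw [e1, e2]
      _ = 2*((2^(p+1) - 1) ^^^ (2^p - 1)) + (1 ^^^ 1) := pvXorHalf _ _ 1 1 (by omega) (by omega)
      _ = 2^(p+1) := by
          rw [ih]
          have hx : (1:Nat) ^^^ 1 = 0 := rfl
          have hp : (2:Nat)^(p+1) = 2*2^p := by ring
          omega

theorem pvXorPowFalse (p : Nat) : ∀ a : Nat, a.testBit p = false → a ^^^ 2^p = a + 2^p := by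
  induction p with
  | zero =>
    intro a h
    have he : a % 2 = 0 := by simpa [Nat.testBit_zero] using h
    have : a = 2*(a/2) + 0 := by omega
    rw [this]
    calc (2*(a/2) + 0) ^^^ 2^0 = (2*(a/2) + 0) ^^^ (2*0 + 1) := by norm_num
      _ = 2*((a/2) ^^^ 0) + (0 ^^^ 1) := pvXorHalf (a/2) 0 0 1 (by omega) (by omega)
      _ = 2*(a/2) + 0 + 2^0 := by simp
  | succ p ih =>
    intro a h
    have hb : (a/2).testBit p = false := by
      simpa [Nat.testBit_succ] using h
    have e : a = 2*(a/2) + a % 2 := by omega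
    have e2 : (2:Nat)^(p+1) = 2*2^p + 0 := by ring
    rw [e, e2]
    calc (2*(a/2) + a % 2) ^^^ (2*2^p + 0)
        = 2*((a/2) ^^^ 2^p) + (a % 2 ^^^ 0) := pvXorHalf (a/2) (2^p) (a % 2) 0 (by omega) (by omega)
      _ = 2*((a/2) + 2^p) + a % 2 := by rw [ih _ hb]; simp
      _ = (2*(a/2) + a % 2) + (2*2^p + 0) := by ring

theorem pvXorPowTrue (p : Nat) (a : Nat) (h : a.testBit p = true) : a = (a ^^^ 2^p) + 2^p := by
  have hb : (a ^^^ 2^p).testBit p = false := by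
    simp [Nat.testBit_xor, h, Nat.testBit_two_pow_self]
  have := pvXorPowFalse p (a ^^^ 2^p) hb
  calc a = (a ^^^ 2^p) ^^^ 2^p := by simp [Nat.xor_assoc]
    _ = (a ^^^ 2^p) + 2^p := this

-- ---- the low-bit / Gray-difference core ----
-- for m ≥ 1: m - (m & (m-1)) = 2^p (the lowest set bit), m ^ (m-1) = 2^(p+1)-1, 2^p ≤ m
theorem pvLowBit : ∀ m : Nat, 0 < m →
    ∃ p : Nat, m - (m &&& (m-1)) = 2^p ∧ (m ^^^ (m-1)) = 2^(p+1) - 1 ∧ 2^p ≤ m := by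
  intro m
  induction m using Nat.strong_induction_on with
  | _ m ih =>
    intro hm
    rcases Nat.even_or_odd m with he | ho
    · -- m = 2k
      obtain ⟨k, hk⟩ := he
      have hk2 : m = 2*k := by omega
      have hkpos : 0 < k := by omega
      obtain ⟨p, h1, h2, h3⟩ := ih k (by omega) hkpos
      refine ⟨p+1, ?_, ?_, ?_⟩
      · have ea : m &&& (m-1) = (2*k + 0) &&& (2*(k-1) + 1) := by
          congr 1 <;> omega
        rw [ea, pvLandHalf k (k-1) 0 1 (by omega) (by omega)]
        have hz : (0:Nat) &&& 1 = 0 := rfl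
        have hle : k &&& (k-1) ≤ k := Nat.and_le_left
        have hkk : k &&& (k-1) = k - 2^p := by omega
        have hp : (2:Nat)^(p+1) = 2*2^p := by ring
        omega
      · have ea : m ^^^ (m-1) = (2*k + 0) ^^^ (2*(k-1) + 1) := by
          congr 1 <;> omega
        rw [ea, pvXorHalf k (k-1) 0 1 (by omega) (by omega)]
        have hx : (0:Nat) ^^^ 1 = 1 := rfl
        have hp : (2:Nat)^(p+1+1) = 2*2^(p+1) := by ring
        have h1p : 1 ≤ (2:Nat)^(p+1) := Nat.one_le_two_pow
        omega
      · have hp : 2^(p+1) = 2*2^p := by ring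
        omega
    · -- m odd
      obtain ⟨j, hj⟩ := ho
      refine ⟨0, ?_, ?_, by omega⟩
      · have ea : m &&& (m-1) = (2*j + 1) &&& (2*j + 0) := by
          congr 1 <;> omega
        rw [ea, pvLandHalf j j 1 0 (by omega) (by omega)]
        have hjj : j &&& j = j := Nat.and_self j
        have hz : (1:Nat) &&& 0 = 0 := rfl
        have h0 : (2:Nat)^0 = 1 := rfl
        omega
      · have ea : m ^^^ (m-1) = (2*j + 1) ^^^ (2*j + 0) := by
          congr 1 <;> omega
        rw [ea, pvXorHalf j j 1 0 (by omega) (by omega)]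
        have hjj : j ^^^ j = 0 := Nat.xor_self j
        have hx : (1:Nat) ^^^ 0 = 1 := rfl
        have h1 : (2:Nat)^(0+1) = 2 := rfl
        omega

-- Gray codes of m and m-1 differ exactly in bit p
theorem pvGrayStepXor (m p : Nat) (hm : 0 < m) (hx : m ^^^ (m-1) = 2^(p+1) - 1) :
    (m ^^^ m/2) ^^^ ((m-1) ^^^ (m-1)/2) = 2^p := by
  have h1 : (m ^^^ m/2) ^^^ ((m-1) ^^^ (m-1)/2)
      = (m ^^^ (m-1)) ^^^ (m/2 ^^^ (m-1)/2) := pvXorSwap _ _ _ _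
  rw [h1, pvXorDiv2, hx]
  have e : (2^(p+1) - 1)/2 = 2^p - 1 := by
    have : (2:Nat)^(p+1) = 2*2^p := by ring
    have h1p : 1 ≤ (2:Nat)^p := Nat.one_le_two_pow
    omega
  rw [e]
  exact pvMersenneXor p

-- ---- Int-side bridges ----
theorem pvBandLow (m : Nat) (hm : 0 < m) :
    PySem.Int.band (m : Int) (-(m : Int)) = ((m - (m &&& (m-1)) : Nat) : Int) := by
  have hneg : ¬ (0 ≤ -(m : Int)) := by omega
  simp only [PySem.Int.band, hneg, if_neg, if_pos (by positivity : (0:Int) ≤ (m:Int))]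
  have e1 : (-(-(m:Int)) - 1).toNat = m - 1 := by omega
  have e2 : ((m:Int)).toNat = m := by omega
  rw [e1, e2]
  simp

theorem pvBitLenPow (p : Nat) : PySem.Int.bitLength ((2^p : Nat) : Int) = p + 1 := by
  induction p with
  | zero => decide
  | succ p ih =>
    rw [PySem.Int.bitLength_natCast (by positivity)]
    have e : (2:Nat)^(p+1)/2 = 2^p := by
      have : (2:Nat)^(p+1) = 2*2^p := by ring
      omega
    rw [e, ih]

theorem pvTestBitDef (x p : Nat) : ((x >>> p) &&& 1 = 1) ↔ x.testBit p := by
  constructor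
  · intro h; simp [Nat.testBit, Nat.and_one_is_mod, Nat.one_and_eq_mod_two] at *; omega
  · intro h; simp [Nat.testBit, Nat.and_one_is_mod, Nat.one_and_eq_mod_two] at *; omega

-- ---- the dict, characterised ----
def pvPairsFrom (xs : List Int) (s : Nat) : List (Int × (List Int × List Int)) :=
  (PySem.List.enumerate xs (s : Int)).flatMap (fun ie =>
    [((1 : Int) <<< ie.1, ([ie.2], ([] : List Int))),
     ((-1 : Int) <<< ie.1, (([] : List Int), [ie.2]))])

theorem pvPairsA_eq (xs : List Int) : pvPairsA xs = pvPairsFrom xs 0 := rfl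

theorem pvPairsFrom_cons (x : Int) (xs : List Int) (s : Nat) :
    pvPairsFrom (x :: xs) s =
      ((2 : Int)^s, ([x], ([] : List Int))) :: (-(2 : Int)^s, (([] : List Int), [x])) :: pvPairsFrom xs (s+1) := by
  simp only [pvPairsFrom, PySem.List.enumerate_cons, List.flatMap_cons]
  rw [show ((s : Int) + 1) = ((s + 1 : Nat) : Int) by push_cast; ring]
  simp [pvShl1I, pvShlNeg1I]

theorem pvPairsKey : ∀ (xs : List Int) (s : Nat), ∀ kv ∈ pvPairsFrom xs s,
    ∃ j : Nat, s ≤ j ∧ j < s + xs.length ∧ (kv.1 = (2:Int)^j ∨ kv.1 = -(2:Int)^j) := by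
  intro xs
  induction xs with
  | nil => intro s kv h; simp [pvPairsFrom, PySem.List.enumerate_nil] at h
  | cons x t ih =>
    intro s kv h
    rw [pvPairsFrom_cons] at h
    simp only [List.mem_cons] at h
    rcases h with h | h | h
    · exact ⟨s, le_refl s, by simp, Or.inl (by rw [h])⟩
    · exact ⟨s, le_refl s, by simp, Or.inr (by rw [h])⟩
    · obtain ⟨j, hj1, hj2, hj3⟩ := ih (s+1) kv h
      exact ⟨j, by omega, by simp at hj2 ⊢; omega, hj3⟩

theorem pvPairsNodup : ∀ (xs : List Int) (s : Nat), ((pvPairsFrom xs s).map (·.1)).Nodup := by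
  intro xs
  induction xs with
  | nil => intro s; simp [pvPairsFrom, PySem.List.enumerate_nil]
  | cons x t ih =>
    intro s
    rw [pvPairsFrom_cons]
    simp only [List.map_cons, List.nodup_cons, List.mem_cons, List.mem_map]
    refine ⟨?_, ?_, ih (s+1)⟩
    · rintro (h | ⟨kv, hkv, hk⟩)
      · have hpos : (0:Int) < 2^s := by positivity
        omega
      · obtain ⟨j, hj1, hj2, hj3 | hj3⟩ := pvPairsKey t (s+1) kv hkv
        · have : (2:Int)^s < 2^j := by
            apply pow_lt_pow_right₀ (by norm_num) (by omega)
          rw [hk] at hj3; omega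
        · have hpos : (0:Int) < 2^s := by positivity
          have hpos2 : (0:Int) < 2^j := by positivity
          rw [hk] at hj3; omega
    · rintro ⟨kv, hkv, hk⟩
      obtain ⟨j, hj1, hj2, hj3 | hj3⟩ := pvPairsKey t (s+1) kv hkv
      · have hpos : (0:Int) < 2^s := by positivity
        have hpos2 : (0:Int) < 2^j := by positivity
        rw [hk] at hj3; omega
      · have : (2:Int)^s < 2^j := by
          apply pow_lt_pow_right₀ (by norm_num) (by omega)
        rw [hk] at hj3; omega

theorem pvPairsLen : ∀ (xs : List Int) (s : Nat), (pvPairsFrom xs s).length = 2 * xs.length := by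
  intro xs
  induction xs with
  | nil => intro s; simp [pvPairsFrom, PySem.List.enumerate_nil]
  | cons x t ih => intro s; rw [pvPairsFrom_cons]; simp [ih (s+1)]; omega

theorem pvPairsMemPos : ∀ (xs : List Int) (s p : Nat) (hp : p < xs.length),
    ((2:Int)^(s+p), ([xs[p]], ([] : List Int))) ∈ pvPairsFrom xs s := by
  intro xs
  induction xs with
  | nil => intro s p hp; simp at hp
  | cons x t ih =>
    intro s p hp
    rw [pvPairsFrom_cons]
    cases p with
    | zero => simp
    | succ p =>
      have := ih (s+1) p (by simpa using Nat.lt_of_succ_lt_succ hp)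
      simp only [List.mem_cons]
      right; right
      rw [show s + (p+1) = (s+1) + p by omega]
      simpa using this

theorem pvPairsMemNeg : ∀ (xs : List Int) (s p : Nat) (hp : p < xs.length),
    (-(2:Int)^(s+p), (([] : List Int), [xs[p]])) ∈ pvPairsFrom xs s := by
  intro xs
  induction xs with
  | nil => intro s p hp; simp at hp
  | cons x t ih =>
    intro s p hp
    rw [pvPairsFrom_cons]
    cases p with
    | zero => simp
    | succ p =>
      have := ih (s+1) p (by simpa using Nat.lt_of_succ_lt_succ hp)
      simp only [List.mem_cons]
      right; right
      rw [show s + (p+1) = (s+1) + p by omega]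
      simpa using this

def pvLookup (xs : List Int) : PySem.Dict Int (List Int × List Int) :=
  (pvPairsA xs).foldl (fun d kv => d.insert kv.1 kv.2) PySem.Dict.empty

theorem pvLookupItems (xs : List Int) : (pvLookup xs).items = pvPairsA xs := by
  unfold pvLookup
  have h := PySem.Dict.items_foldl_insert_fresh (pvPairsA xs) (fun kv => kv.1) (fun kv => kv.2)
    PySem.Dict.empty (by intro a _; simp) (by rw [pvPairsA_eq]; exact pvPairsNodup xs 0)
  simpa using h

theorem pvLookupNodupKeys (xs : List Int) : (pvLookup xs).keys.Nodup :=
  PySem.Dict.nodup_keys_foldl_insert_key (pvPairsA xs) (fun kv => kv.1) (fun _ kv => kv.2)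
    PySem.Dict.empty PySem.Dict.nodup_keys_empty

theorem pvLookupSize (xs : List Int) : (pvLookup xs).size = 2 * xs.length := by
  show (pvLookup xs).items.length = 2 * xs.length
  rw [pvLookupItems, pvPairsA_eq, pvPairsLen]

theorem pvLookupGetPos (xs : List Int) (p : Nat) (hp : p < xs.length) :
    (pvLookup xs).getD ((2:Int)^p) ([], []) = ([xs[p]], []) := by
  apply PySem.Dict.getD_of_mem_items
  · rw [pvLookupItems, pvPairsA_eq]
    simpa using pvPairsMemPos xs 0 p hp
  · exact pvLookupNodupKeys xs

theorem pvLookupGetNeg (xs : List Int) (p : Nat) (hp : p < xs.length) :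
    (pvLookup xs).getD (-(2:Int)^p) ([], []) = ([], [xs[p]]) := by
  apply PySem.Dict.getD_of_mem_items
  · rw [pvLookupItems, pvPairsA_eq]
    simpa using pvPairsMemNeg xs 0 p hp
  · exact pvLookupNodupKeys xs

-- ---- the per-iteration agreement (A's dict lookup = the arithmetic body) ----
theorem pvStep (xs : List Int) (i : Int) (h1 : 1 ≤ i) (h2 : i < 2^xs.length) :
    (pvLookup xs).getD
      (PySem.Int.bxor i (i >>> (1:Nat)) - PySem.Int.bxor (i-1) ((i-1) >>> (1:Nat))) ([], [])
      = pvBodyB xs i := by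
  lift i to Nat using (by omega) with m
  have hm : 0 < m := by exact_mod_cast h1
  have hmn : m < 2^xs.length := by exact_mod_cast h2
  obtain ⟨p, hlow, hx, hle⟩ := pvLowBit m hm
  have hpn : p < xs.length := by
    by_contra hc
    have : (2:Nat)^xs.length ≤ 2^p := Nat.pow_le_pow_right (by norm_num) (by omega)
    omega
  have hband : PySem.Int.band (m : Int) (-(m : Int)) = ((2^p : Nat) : Int) := by
    rw [pvBandLow m hm, hlow]
  have hbl : (PySem.Int.bitLength (PySem.Int.band (m : Int) (-(m : Int))) : Int) - 1 = (p : Int) := by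
    rw [hband, pvBitLenPow]; push_cast; ring
  have hg : PySem.Int.bxor (m : Int) ((m : Int) >>> (1:Nat)) = ((m ^^^ m/2 : Nat) : Int) := by
    rw [show ((m : Int) >>> (1:Nat)) = ((m >>> 1 : Nat) : Int) from rfl, PySem.Int.bxor_natCast,
      Nat.shiftRight_one]
  have hm1 : (m : Int) - 1 = ((m - 1 : Nat) : Int) := by omega
  have hg' : PySem.Int.bxor ((m : Int) - 1) (((m : Int) - 1) >>> (1:Nat)) = (((m-1) ^^^ (m-1)/2 : Nat) : Int) := by
    rw [hm1, show ((((m-1 : Nat) : Int)) >>> (1:Nat)) = (((m-1) >>> 1 : Nat) : Int) from rfl,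
      PySem.Int.bxor_natCast, Nat.shiftRight_one]
  have hgx : (m ^^^ m/2) ^^^ ((m-1) ^^^ (m-1)/2) = 2^p := pvGrayStepXor m p hm hx
  rw [pvBodyB]
  simp only [hbl, Int.toNat_natCast, hg, hg']
  rw [show (((m ^^^ m/2 : Nat) : Int)) >>> p = (((m ^^^ m/2) >>> p : Nat) : Int) from rfl]
  have hband1 : PySem.Int.band ((((m ^^^ m/2) >>> p : Nat) : Int)) 1
      = ((((m ^^^ m/2) >>> p) &&& 1 : Nat) : Int) := by
    exact_mod_cast PySem.Int.band_natCast ((m ^^^ m/2) >>> p) 1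
  rw [hband1, PySem.List.pyGetD_natCast, List.getD_eq_getElem xs 0 hpn]
  by_cases hb : (m ^^^ m/2).testBit p
  · have hkey : ((m ^^^ m/2 : Nat) : Int) - ((m-1 ^^^ (m-1)/2 : Nat) : Int) = (2:Int)^p := by
      have hprev : (m-1) ^^^ (m-1)/2 = (m ^^^ m/2) ^^^ 2^p := by
        calc (m-1) ^^^ (m-1)/2 = ((m ^^^ m/2) ^^^ ((m ^^^ m/2) ^^^ ((m-1) ^^^ (m-1)/2))) := by
              simp [← Nat.xor_assoc]
          _ = (m ^^^ m/2) ^^^ 2^p := by rw [hgx]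
      have := pvXorPowTrue p (m ^^^ m/2) hb
      have hc : (((2:Nat)^p : Nat) : Int) = (2:Int)^p := by push_cast; ring
      rw [hprev, ← hc]
      omega
    rw [hkey, pvLookupGetPos xs p hpn]
    have hcond : ((m ^^^ m/2) >>> p) &&& 1 = 1 := (pvTestBitDef _ _).mpr hb
    rw [if_pos (by exact_mod_cast hcond)]
  · have hb' : (m ^^^ m/2).testBit p = false := by simpa using hb
    have hkey : ((m ^^^ m/2 : Nat) : Int) - ((m-1 ^^^ (m-1)/2 : Nat) : Int) = -(2:Int)^p := by
      have hprev : (m-1) ^^^ (m-1)/2 = (m ^^^ m/2) ^^^ 2^p := by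
        calc (m-1) ^^^ (m-1)/2 = ((m ^^^ m/2) ^^^ ((m ^^^ m/2) ^^^ ((m-1) ^^^ (m-1)/2))) := by
              simp [← Nat.xor_assoc]
          _ = (m ^^^ m/2) ^^^ 2^p := by rw [hgx]
      have := pvXorPowFalse p (m ^^^ m/2) hb'
      have hc : (((2:Nat)^p : Nat) : Int) = (2:Int)^p := by push_cast; ring
      rw [hprev, ← hc]
      omega
    rw [hkey, pvLookupGetNeg xs p hpn]
    have hcond : ((m ^^^ m/2) >>> p) &&& 1 ≠ 1 := fun hc => hb ((pvTestBitDef _ _).mp hc)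
    rw [if_neg (fun hc => hcond (by exact_mod_cast hc))]

-- ---- A's loop, as an invariant over the range ----
theorem pvLoop (xs : List Int) (b : Int) :
    ∀ (n : Nat) (a : Int) (acc : List (List Int × List Int)), 1 ≤ a → (b - a).toNat = n →
    (∀ i : Int, a ≤ i → i < b →
      (pvLookup xs).getD
        (PySem.Int.bxor i (i >>> (1:Nat)) - PySem.Int.bxor (i-1) ((i-1) >>> (1:Nat))) ([], [])
        = pvBodyB xs i) →
    ((PySem.List.pyRange a b 1).foldl (pvStepA (pvLookup xs))
        (PySem.Int.bxor (a-1) ((a-1) >>> (1:Nat)), acc)).2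
      = acc ++ (PySem.List.pyRange a b 1).map (pvBodyB xs) := by
  intro n
  induction n with
  | zero =>
    intro a acc ha hn _
    rw [PySem.List.pyRange_one_eq_nil (by omega)]
    simp
  | succ n ih =>
    intro a acc ha hn H
    rw [PySem.List.pyRange_one_cons (by omega)]
    simp only [List.foldl_cons, List.map_cons, pvStepA]
    rw [H a (le_refl a) (by omega)]
    have h2 := ih (a+1) (acc ++ [pvBodyB xs a]) (by omega) (by omega)
      (fun i hi1 hi2 => H i (by omega) hi2)
    rw [show (a + 1 - 1 : Int) = a by ring] at h2
    rw [h2, List.append_assoc]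
    rfl

-- A's port equals the arithmetic characterisation
theorem pvAchar (collection : List Int) :
    powerset_delta collection
      = (PySem.List.pyRange 1 ((1 : Int) <<< collection.length) 1).map (pvBodyB collection) := by
  have hlu : (pvPairsA collection).foldl (fun d kv => d.insert kv.1 kv.2) PySem.Dict.empty
      = pvLookup collection := rfl
  simp only [powerset_delta, hlu, pvLookupSize]
  have hn : 2 * collection.length / 2 = collection.length := by omega
  rw [hn]
  have h0 : ((0 : Int), ([] : List (List Int × List Int)))
      = (PySem.Int.bxor ((1:Int)-1) (((1:Int)-1) >>> (1:Nat)), ([] : List (List Int × List Int))) := by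
    norm_num
  rw [h0]
  rw [pvLoop collection ((1:Int) <<< collection.length) (((1:Int) <<< collection.length - 1)).toNat 1 []
    (le_refl 1) rfl
    (fun i hi1 hi2 => pvStep collection i hi1 (by rwa [pvShl1] at hi2))]
  simp


-- ---- B-side: the arithmetic body, decoded at m = q*2^(p+1) + 2^p ----
theorem pvLandForm : ∀ p q : Nat, (q*2^(p+1) + 2^p) &&& (q*2^(p+1) + 2^p - 1) = q*2^(p+1) := by
  intro p
  induction p with
  | zero =>
    intro q
    have e1 : q*2^(0+1) + 2^0 = 2*q + 1 := by ring
    rw [e1]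
    have e2 : 2*q + 1 - 1 = 2*q + 0 := by omega
    rw [e2, pvLandHalf q q 1 0 (by omega) (by omega)]
    have h1 : q &&& q = q := Nat.and_self q
    have h2 : (1:Nat) &&& 0 = 0 := rfl
    have h3 : q*2^(0+1) = 2*q := by ring
    omega
  | succ p ih =>
    intro q
    have h2p : 0 < (2:Nat)^p := by positivity
    have e1 : q*2^(p+1+1) + 2^(p+1) = 2*(q*2^(p+1) + 2^p) + 0 := by ring
    rw [e1]
    have e2 : 2*(q*2^(p+1) + 2^p) + 0 - 1 = 2*((q*2^(p+1) + 2^p) - 1) + 1 := by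
      have : 0 < q*2^(p+1) + 2^p := by positivity
      omega
    rw [e2, pvLandHalf _ _ 0 1 (by omega) (by omega), ih q]
    have h2 : (0:Nat) &&& 1 = 0 := rfl
    have h3 : q*2^(p+1+1) = 2*(q*2^(p+1)) := by ring
    omega

theorem pvTestBitEq (x p : Nat) : x.testBit p = decide (x / 2^p % 2 = 1) := by
  have h := pvTestBitDef x p
  rw [Nat.shiftRight_eq_div_pow, Nat.and_one_is_mod] at h
  by_cases hc : x / 2^p % 2 = 1
  · simp [hc, h.mp hc]
  · cases hb : x.testBit p
    · simp [hc]
    · exact absurd (h.mpr hb) hc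

theorem pvBodyChar (ys : List Int) (p q : Nat) (hp : p < ys.length) :
    pvBodyB ys ((q*2^(p+1) + 2^p : Nat) : Int)
      = if q % 2 = 0 then ([ys[p]], ([] : List Int)) else (([] : List Int), [ys[p]]) := by
  set m : Nat := q*2^(p+1) + 2^p with hmdef
  have h2p : 0 < (2:Nat)^p := by positivity
  have hc : (2:Nat)^(p+1) = 2*2^p := by ring
  have hm : 0 < m := by omega
  have hland : m &&& (m-1) = q*2^(p+1) := pvLandForm p q
  have hlow : m - (m &&& (m-1)) = 2^p := by omega
  have hmform : m = (2*q+1) * 2^p := by rw [hmdef]; ring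
  have hdivp : m / 2^p = 2*q + 1 := by rw [hmform]; exact Nat.mul_div_cancel _ h2p
  have hdivp1 : m / 2^(p+1) = q := by
    rw [show m = 2^p + 2^(p+1)*q from by rw [hmdef]; ring,
      Nat.add_mul_div_left _ _ (show 0 < (2:Nat)^(p+1) by positivity),
      Nat.div_eq_of_lt (by omega)]
    omega
  have hband : PySem.Int.band (m : Int) (-(m : Int)) = ((2^p : Nat) : Int) := by
    rw [pvBandLow m hm, hlow]
  have hbl : (PySem.Int.bitLength (PySem.Int.band (m : Int) (-(m : Int))) : Int) - 1 = (p : Int) := by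
    rw [hband, pvBitLenPow]; push_cast; ring
  have hg : PySem.Int.bxor (m : Int) ((m : Int) >>> (1:Nat)) = ((m ^^^ m/2 : Nat) : Int) := by
    rw [show ((m : Int) >>> (1:Nat)) = ((m >>> 1 : Nat) : Int) from rfl, PySem.Int.bxor_natCast,
      Nat.shiftRight_one]
  rw [pvBodyB]
  simp only [hbl, Int.toNat_natCast, hg]
  rw [show (((m ^^^ m/2 : Nat) : Int)) >>> p = (((m ^^^ m/2) >>> p : Nat) : Int) from rfl]
  have hband1 : PySem.Int.band ((((m ^^^ m/2) >>> p : Nat) : Int)) 1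
      = ((((m ^^^ m/2) >>> p) &&& 1 : Nat) : Int) := by
    exact_mod_cast PySem.Int.band_natCast ((m ^^^ m/2) >>> p) 1
  rw [hband1, PySem.List.pyGetD_natCast, List.getD_eq_getElem ys 0 hp]
  have htp : m.testBit p = true := by
    rw [pvTestBitEq, hdivp]
    simp [Nat.mul_add_mod]
  have htp1 : (m/2).testBit p = decide (q % 2 = 1) := by
    rw [Nat.testBit_div_two, pvTestBitEq, hdivp1]
  have hgbit : (m ^^^ m/2).testBit p = decide (q % 2 = 0) := by
    rw [Nat.testBit_xor, htp, htp1]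
    by_cases hq : q % 2 = 0
    · have h1 : ¬(q % 2 = 1) := by omega
      simp [hq, h1]
    · have h1 : q % 2 = 1 := by omega
      simp [hq, h1]
  by_cases hq : q % 2 = 0
  · have hcond : ((m ^^^ m/2) >>> p) &&& 1 = 1 := (pvTestBitDef _ _).mpr (by rw [hgbit]; exact decide_eq_true hq)
    rw [if_pos (by exact_mod_cast hcond), if_pos hq]
  · have hb : (m ^^^ m/2).testBit p ≠ true := by rw [hgbit]; simp [hq]
    have hcond : ((m ^^^ m/2) >>> p) &&& 1 ≠ 1 := fun hcc => hb ((pvTestBitDef _ _).mp hcc)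
    rw [if_neg (fun hcc => hcond (by exact_mod_cast hcc)), if_neg hq]

-- every 1 ≤ m is q*2^(p+1) + 2^p for unique p, q (we only need existence)
theorem pvDecomp (m : Nat) (hm : 0 < m) : ∃ p q : Nat, m = q*2^(p+1) + 2^p ∧ 2^p ≤ m := by
  induction m using Nat.strong_induction_on with
  | _ m ih =>
    rcases Nat.even_or_odd m with he | ho
    · obtain ⟨k, hk⟩ := he
      have hkpos : 0 < k := by omega
      obtain ⟨p, q, h1, h2⟩ := ih k (by omega) hkpos
      refine ⟨p+1, q, ?_, ?_⟩
      · have : m = 2*k := by omega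
        rw [this, h1]; ring
      · have hp : (2:Nat)^(p+1+1) = 2*2^(p+1) := by ring
        omega
    · obtain ⟨j, hj⟩ := ho
      exact ⟨0, j, by omega, by omega⟩

-- fact (i): indices below 2^n do not see the appended element
theorem pvBodyFront (xs : List Int) (e : Int) (m : Nat) (h1 : 1 ≤ m) (h2 : m < 2^xs.length) :
    pvBodyB (xs ++ [e]) (m : Int) = pvBodyB xs (m : Int) := by
  obtain ⟨p, q, hd, hle⟩ := pvDecomp m h1
  have hpn : p < xs.length := by
    by_contra hcontra
    have : (2:Nat)^xs.length ≤ 2^p := Nat.pow_le_pow_right (by norm_num) (by omega)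
    omega
  have hpn' : p < (xs ++ [e]).length := by simp; omega
  rw [hd, pvBodyChar (xs ++ [e]) p q hpn', pvBodyChar xs p q hpn]
  have hgete : (xs ++ [e])[p]'hpn' = xs[p]'hpn := List.getElem_append_left hpn
  rw [hgete]

-- fact (ii): index 2^n adds the appended element
theorem pvBodyMid (xs : List Int) (e : Int) :
    pvBodyB (xs ++ [e]) ((2^xs.length : Nat) : Int) = ([e], ([] : List Int)) := by
  have hpn : xs.length < (xs ++ [e]).length := by simp
  have hd : (2:Nat)^xs.length = 0*2^(xs.length+1) + 2^xs.length := by ring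
  rw [hd, pvBodyChar (xs ++ [e]) xs.length 0 hpn]
  have hget : (xs ++ [e])[xs.length]'hpn = e := by
    rw [List.getElem_append_right (le_refl xs.length)]
    simp
  simp [hget]

-- fact (iii): the second half mirrors the first with add/remove swapped
theorem pvBodyMirror (xs : List Int) (e : Int) (j : Nat) (h1 : 1 ≤ j) (h2 : j < 2^xs.length) :
    pvBodyB (xs ++ [e]) ((2^xs.length + j : Nat) : Int)
      = (fun pr : List Int × List Int => (pr.2, pr.1)) (pvBodyB xs ((2^xs.length - j : Nat) : Int)) := by
  set n := xs.length with hn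
  obtain ⟨p, q, hd, hle⟩ := pvDecomp j h1
  have hpn : p < n := by
    by_contra hcontra
    have : (2:Nat)^n ≤ 2^p := Nat.pow_le_pow_right (by norm_num) (by omega)
    omega
  have hpn' : p < (xs ++ [e]).length := by simp; omega
  set c : Nat := 2^(p+1) with hcdef
  have hch : c = 2*2^p := by rw [hcdef]; ring
  set K : Nat := 2^(n-p-1) with hKdef
  have hKc : K*c = 2^n := by
    rw [hKdef, hcdef, ← pow_add]
    congr 1
    omega
  have hqK : q + 1 ≤ K := by
    by_contra hcontra
    have hge : K ≤ q := by omega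
    have : K*c ≤ q*c := Nat.mul_le_mul_right c hge
    omega
  have hfront : (2:Nat)^n + j = (K + q)*c + 2^p := by
    have e1 : (K + q)*c = K*c + q*c := by ring
    omega
  have hmirror : (2:Nat)^n - j = (K - q - 1)*c + 2^p := by
    have e1 : (K - q - 1)*c = K*c - (q+1)*c := by rw [Nat.sub_sub, Nat.sub_mul]
    have e2 : (q+1)*c = q*c + c := by ring
    have e3 : (q+1)*c ≤ K*c := Nat.mul_le_mul_right c hqK
    have h2p : 0 < (2:Nat)^p := by positivity
    omega
  rw [hfront, hmirror, pvBodyChar (xs ++ [e]) p (K + q) hpn', pvBodyChar xs p (K - q - 1) hpn]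
  have hgete : (xs ++ [e])[p]'hpn' = xs[p]'hpn := List.getElem_append_left hpn
  rw [hgete]
  have hpar : (K + q) % 2 = 0 ↔ ¬ ((K - q - 1) % 2 = 0) := by omega
  by_cases hq : (K + q) % 2 = 0
  · rw [if_pos hq, if_neg (by omega)]
  · rw [if_neg hq, if_pos (by omega)]

-- the mirrored half of the range, pointwise
theorem pvMapMirror (xs : List Int) (e : Int) :
    (PySem.List.pyRange (((2^xs.length : Nat) : Int) + 1) (((2^xs.length : Nat) : Int) + ((2^xs.length : Nat) : Int)) 1).map (pvBodyB (xs ++ [e]))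
      = (((PySem.List.pyRange 1 ((2^xs.length : Nat) : Int) 1).map (pvBodyB xs)).reverse).map
          (fun pr : List Int × List Int => (pr.2, pr.1)) := by
  set N : Nat := 2^xs.length with hNdef
  have hN1 : 1 ≤ N := Nat.one_le_two_pow
  apply List.ext_getElem
  · simp only [List.length_map, List.length_reverse, PySem.List.length_pyRange_one]
    omega
  · intro t hL hR
    have ht : t < N - 1 := by
      simp only [List.length_map, PySem.List.length_pyRange_one] at hL
      omega
    simp only [List.getElem_map, List.getElem_reverse, List.length_map,
      PySem.List.length_pyRange_one, PySem.List.getElem_pyRange_one]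
    have hj := pvBodyMirror xs e (1+t) (by omega) (by omega)
    rw [← hNdef] at hj
    have hargL : ((N:Int) + 1) + (t:Int) = ((N + (1+t) : Nat) : Int) := by push_cast; ring
    have hargR : (1:Int) + ((((N:Int) - 1).toNat - 1 - t : Nat) : Int) = ((N - (1+t) : Nat) : Int) := by
      have h1 : ((N:Int) - 1).toNat = N - 1 := by omega
      rw [h1]
      omega
    rw [hargL, hargR]
    exact hj

-- B's port equals the arithmetic characterisation
theorem pvBchar (collection : List Int) :
    powerset_delta_alt collection
      = (PySem.List.pyRange 1 ((1 : Int) <<< collection.length) 1).map (pvBodyB collection) := by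
  induction collection using List.reverseRecOn with
  | nil =>
    rw [show powerset_delta_alt [] = [] from rfl]
    rw [PySem.List.pyRange_one_eq_nil (by norm_num [pvShl1])]
    simp
  | append_singleton xs e ih =>
    set N : Nat := 2^xs.length with hNdef
    have hN1 : 1 ≤ N := Nat.one_le_two_pow
    have hNc : (1 : Int) <<< xs.length = ((N:Nat) : Int) := by rw [pvShl1]; push_cast; simp [hNdef]
    have hNc2 : (1 : Int) <<< (xs ++ [e]).length = ((N:Nat) : Int) + ((N:Nat) : Int) := by
      rw [pvShl1]
      simp only [List.length_append, List.length_singleton]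
      push_cast [hNdef]
      rw [pow_succ]
      ring
    have hstep : powerset_delta_alt (xs ++ [e])
        = powerset_delta_alt xs ++ [([e], ([] : List Int))]
          ++ (powerset_delta_alt xs).reverse.map (fun p => (p.2, p.1)) := by
      unfold powerset_delta_alt
      rw [List.foldl_append]
      rfl
    have hA : (PySem.List.pyRange 1 ((N:Nat) : Int) 1).map (pvBodyB (xs ++ [e]))
        = (PySem.List.pyRange 1 ((N:Nat) : Int) 1).map (pvBodyB xs) := by
      apply List.map_congr_left
      intro i hi
      rw [PySem.List.mem_pyRange_one] at hi
      have hcast : i = ((i.toNat : Nat) : Int) := by omega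
      rw [hcast]
      exact pvBodyFront xs e i.toNat (by omega) (by omega)
    have hmid : pvBodyB (xs ++ [e]) ((N:Nat) : Int) = ([e], ([] : List Int)) := pvBodyMid xs e
    have hmir := pvMapMirror xs e
    rw [← hNdef] at hmir
    calc powerset_delta_alt (xs ++ [e])
        = powerset_delta_alt xs ++ [([e], ([] : List Int))]
            ++ (powerset_delta_alt xs).reverse.map (fun p => (p.2, p.1)) := hstep
      _ = (PySem.List.pyRange 1 ((N:Nat) : Int) 1).map (pvBodyB xs) ++ [([e], ([] : List Int))]
            ++ ((PySem.List.pyRange 1 ((N:Nat) : Int) 1).map (pvBodyB xs)).reverse.map (fun p => (p.2, p.1)) := by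
          rw [ih, hNc]
      _ = (PySem.List.pyRange 1 ((N:Nat) : Int) 1).map (pvBodyB (xs ++ [e]))
            ++ [pvBodyB (xs ++ [e]) ((N:Nat) : Int)]
            ++ (PySem.List.pyRange (((N:Nat) : Int) + 1) (((N:Nat) : Int) + ((N:Nat) : Int)) 1).map (pvBodyB (xs ++ [e])) := by
          rw [hA, hmid, hmir]
      _ = (PySem.List.pyRange 1 ((1 : Int) <<< (xs ++ [e]).length) 1).map (pvBodyB (xs ++ [e])) := by
          rw [hNc2]
          rw [PySem.List.pyRange_one_append 1 ((N:Nat):Int) (((N:Nat):Int) + ((N:Nat):Int)) (by omega) (by omega)]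
          rw [PySem.List.pyRange_one_append ((N:Nat):Int) (((N:Nat):Int)+1) (((N:Nat):Int) + ((N:Nat):Int)) (by omega) (by omega)]
          rw [PySem.List.pyRange_one_singleton]
          simp [List.map_append, List.append_assoc]

-- ===== VERDICT (by name: the statement is the Claim_ definition above) =====
theorem powerset_delta_spec : Claim_equal_powerset_delta := by
  unfold Claim_equal_powerset_delta Spec_powerset_delta
  intro collection _dom
  rw [pvAchar, pvBchar]
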